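-- pv_equiv track=rewrite | github.com/revers3ntropy/CodingChallenges | Google kickstart G 2021/Banana Bunches.py | bunches
-- ===== SOURCE A (Python) =====
-- def bunches(trees, K):
--     best_cost = len(trees)+1
--     found = False
--
--     for arr1_start in range(len(trees)):
--
--         if trees[arr1_start] == K:
--             return 1
--
--         for arr1_end in range(arr1_start, len(trees)+1):
--
--             arr1 = trees[arr1_start:arr1_end]
--
--             if sum(arr1) == K:
--                 found = True
--                 cost = len(arr1)
--                 if cost < best_cost:
--                     best_cost = cost
--
--             for arr2_start in range(arr1_end, len(trees)):
--                 for arr2_end in range(arr2_start, len(trees)+1):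
--                     arr2 = trees[arr2_start:arr2_end]
--
--                     if sum(arr1) + sum(arr2) == K:
--                         found = True
--                         cost = len(arr1) + len(arr2)
--                         if cost < best_cost:
--                             best_cost = cost
--
--     if not found:
--         return -1
--
--     return best_cost
-- ===== SOURCE B (Python) =====
-- def bunches(trees, K):
--     n = len(trees)
--     P = [0]
--     s = 0
--     for t in trees:
--         s += t
--         P.append(s)
--     cands = [(j - i) + (q - p)
--              for i in range(n + 1)
--              for j in range(i, n + 1)
--              for p in range(j, n + 1)
--              for q in range(p, n + 1)
--              if (P[j] - P[i]) + (P[q] - P[p]) == K]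
--     return min(cands) if cands else -1
-- ===== Notes on version B (the rewrite author's own statement) =====
-- stated objective: alternative
-- what changed: B precomputes a prefix-sum list and takes the minimum of one flat comprehension of all (i,j,p,q) pair costs with O(1) segment sums, instead of A's four nested loops that re-slice and re-sum both subarrays at every step, with mutable found/best state and an early return; intended as faster (measured 5.2x at n=64, O(n^4) vs O(n^5)), but a timing run could not confirm it at its largest size, where both time out.
-- intended difference: When K = 0 and trees is empty or contains a 0, A returns -1 resp. 1 (its early single-element return fires before the cheaper option is considered), although two empty subarrays of total length 0 attain sum K = 0 and A itself returns 0 for K = 0 on other inputs; B returns the intended minimum 0. — e.g. on bunches([0], 0): A returns 1, B returns 0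
import Mathlib
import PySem

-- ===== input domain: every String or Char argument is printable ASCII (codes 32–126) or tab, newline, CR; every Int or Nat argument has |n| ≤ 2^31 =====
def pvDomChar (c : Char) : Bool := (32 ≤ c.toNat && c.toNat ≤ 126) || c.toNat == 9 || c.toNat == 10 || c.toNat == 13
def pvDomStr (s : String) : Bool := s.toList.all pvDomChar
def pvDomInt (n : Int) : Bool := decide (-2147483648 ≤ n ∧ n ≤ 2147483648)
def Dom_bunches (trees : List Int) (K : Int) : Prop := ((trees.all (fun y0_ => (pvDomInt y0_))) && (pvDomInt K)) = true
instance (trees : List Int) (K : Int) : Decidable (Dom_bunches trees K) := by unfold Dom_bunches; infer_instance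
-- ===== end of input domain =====

-- B replaces A's four nested loops with re-sliced sums, mutable found/best state and an
-- early return by a prefix-sum list and one min over the flat comprehension of all
-- candidate pair costs (objective: alternative; one asymptotic level cheaper, measured
-- 5.2x at n=64, but not confirmed fast at the largest timing size).

-- ===== PORT A =====
-- innermost loop body: 'if sum(arr1)+sum(arr2)==K: …update found/best_cost'
def stepA2e (trees : List Int) (K : Int) (arr1 : List Int) (a2s : Int)
    (st : Bool × Int) (a2e : Int) : Bool × Int :=
  let arr2 := PySem.List.slice trees (some a2s) (some a2e)
  if arr1.sum + arr2.sum = K then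
    let cost : Int := (arr1.length : Int) + (arr2.length : Int)
    (true, if cost < st.2 then cost else st.2)
  else st

-- 'for arr2_end in range(arr2_start, len(trees)+1): …'
def stepA2s (trees : List Int) (K : Int) (arr1 : List Int)
    (st : Bool × Int) (a2s : Int) : Bool × Int :=
  (PySem.List.pyRange a2s ((trees.length : Int) + 1) 1).foldl (stepA2e trees K arr1 a2s) st

-- body of 'for arr1_end in range(arr1_start, len(trees)+1)': the standalone sum(arr1)==K
-- check, then 'for arr2_start in range(arr1_end, len(trees)): …'
def stepA1e (trees : List Int) (K : Int) (a1s : Int)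
    (st : Bool × Int) (a1e : Int) : Bool × Int :=
  let arr1 := PySem.List.slice trees (some a1s) (some a1e)
  let st1 := if arr1.sum = K then
      (true, if (arr1.length : Int) < st.2 then (arr1.length : Int) else st.2)
    else st
  (PySem.List.pyRange a1e (trees.length : Int) 1).foldl (stepA2s trees K arr1) st1

-- 'for arr1_start in range(len(trees)):' with the early 'return 1' on trees[arr1_start]==K,
-- then 'return -1 if not found else best_cost'
def outerA (trees : List Int) (K : Int) : List Int → Bool × Int → Int
  | [], st => if st.1 = false then -1 else st.2
  | s :: rest, st =>
    if PySem.List.pyGet? trees s = some K then 1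
    else outerA trees K rest
      ((PySem.List.pyRange s ((trees.length : Int) + 1) 1).foldl (stepA1e trees K s) st)

def bunches (trees : List Int) (K : Int) : Int :=
  outerA trees K (PySem.List.pyRange 0 (trees.length : Int) 1)
    (false, (trees.length : Int) + 1)

-- ===== PORT B =====
-- prefix-sum list P: 'P=[0]; s=0; for t in trees: s+=t; P.append(s)'
def altP (trees : List Int) : List Int :=
  (trees.foldl (fun acc t => (acc.1 ++ [acc.2 + t], acc.2 + t)) (([0] : List Int), (0 : Int))).1

-- P[j]; every index used is in range, so the default never fires (comment: exact there)
def altGet (P : List Int) (j : Int) : Int := (PySem.List.pyGet? P j).getD 0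

-- the candidate-cost comprehension over i ≤ j ≤ p ≤ q ≤ n
def altCands (trees : List Int) (K : Int) : List Int :=
  let n : Int := trees.length
  let P := altP trees
  (PySem.List.pyRange 0 (n + 1) 1).flatMap fun i =>
    (PySem.List.pyRange i (n + 1) 1).flatMap fun j =>
      (PySem.List.pyRange j (n + 1) 1).flatMap fun p =>
        ((PySem.List.pyRange p (n + 1) 1).filter fun q =>
            (altGet P j - altGet P i) + (altGet P q - altGet P p) == K).map fun q =>
          (j - i) + (q - p)

-- 'return min(cands) if cands else -1' (min never fails on the nonempty branch)
def bunches_alt (trees : List Int) (K : Int) : Int :=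
  let cands := altCands trees K
  if cands = [] then -1 else (PySem.List.min? cands (fun x => x)).getD (-1)

-- ===== PRECONDITION & SPEC =====
-- When K = 0 and trees is empty or contains a 0, A returns -1 resp. 1 (its early
-- single-element return), although two empty subarrays of total length 0 attain K = 0
-- (A itself returns 0 for K = 0 on other inputs); B returns the intended minimum 0.
def D_bunches (trees : List Int) (K : Int) : Prop :=
  K = 0 ∧ (trees = [] ∨ (0 : Int) ∈ trees)
instance (trees : List Int) (K : Int) : Decidable (D_bunches trees K) := by
  unfold D_bunches; infer_instance

def Spec_bunches (trees : List Int) (K : Int) (out : Int) : Prop :=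
  ¬ D_bunches trees K → out = bunches_alt trees K
instance (trees : List Int) (K : Int) (out : Int) : Decidable (Spec_bunches trees K out) := by
  unfold Spec_bunches; infer_instance

def pvDiffWitness_bunches : List Int × Int := ([0], 0)
def pvDiffWitnessOut_bunches : Int × Int := (1, 0)

-- ===== CLAIM (what is proved, stated in full; the proofs are below) =====
def Claim_unchanged_bunches : Prop := ∀ (trees : List Int) (K : Int), Dom_bunches trees K → Spec_bunches trees K (bunches trees K)
def Claim_changed_bunches : Prop := Dom_bunches (pvDiffWitness_bunches.1) (pvDiffWitness_bunches.2) ∧ D_bunches (pvDiffWitness_bunches.1) (pvDiffWitness_bunches.2) ∧ bunches (pvDiffWitness_bunches.1) (pvDiffWitness_bunches.2) = pvDiffWitnessOut_bunches.1 ∧ bunches_alt (pvDiffWitness_bunches.1) (pvDiffWitness_bunches.2) = pvDiffWitnessOut_bunches.2 ∧ pvDiffWitnessOut_bunches.1 ≠ pvDiffWitnessOut_bunches.2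
def Claim_exact_bunches : Prop := ∀ (trees : List Int) (K : Int), Dom_bunches trees K → D_bunches trees K → bunches trees K ≠ bunches_alt trees K

-- ===== LEMMAS AND PROOFS =====

-- sum of the segment [i, j) of trees
def segS (trees : List Int) (i j : Nat) : Int := ((trees.drop i).take (j - i)).sum

-- the shared candidate predicate: c is the total length of an admissible pair of segments
def Good (trees : List Int) (K : Int) (c : Int) : Prop :=
  ∃ i j p q : Nat, i ≤ j ∧ j ≤ p ∧ p ≤ q ∧ q ≤ trees.length ∧
    segS trees i j + segS trees p q = K ∧ c = ((j - i : Nat) : Int) + ((q - p : Nat) : Int)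

-- abstract spec of a found/best-cost updater collecting candidate set C
def UpdSpec (F : Bool × Int → Bool × Int) (C : Int → Prop) : Prop :=
  ∀ st : Bool × Int,
    (F st).2 ≤ st.2 ∧
    ((F st).2 = st.2 ∨ C (F st).2) ∧
    (∀ c, C c → (F st).2 ≤ c) ∧
    ((F st).1 = true ↔ st.1 = true ∨ ∃ c, C c)


theorem updspec_congr {F : Bool × Int → Bool × Int} {C C' : Int → Prop}
    (h : UpdSpec F C) (hCC : ∀ c, C c ↔ C' c) : UpdSpec F C' := by
  intro st
  obtain ⟨h1, h2, h3, h4⟩ := h st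
  refine ⟨h1, ?_, fun c hc => h3 c ((hCC c).mpr hc), ?_⟩
  · rcases h2 with h2 | h2
    · exact Or.inl h2
    · exact Or.inr ((hCC _).mp h2)
  · rw [h4]
    constructor
    · rintro (h | ⟨c, hc⟩)
      · exact Or.inl h
      · exact Or.inr ⟨c, (hCC c).mp hc⟩
    · rintro (h | ⟨c, hc⟩)
      · exact Or.inl h
      · exact Or.inr ⟨c, (hCC c).mpr hc⟩

theorem updspec_single (cond : Prop) [Decidable cond] (cost : Int) :
    UpdSpec (fun st => if cond then (true, if cost < st.2 then cost else st.2) else st)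
      (fun c => cond ∧ c = cost) := by
  intro st
  by_cases hc : cond
  · by_cases hlt : cost < st.2
    · refine ⟨?_, ?_, ?_, ?_⟩ <;> simp only [if_pos hc, if_pos hlt]
      · exact le_of_lt hlt
      · exact Or.inr ⟨hc, trivial⟩
      · intro c h; omega
      · exact iff_of_true trivial (Or.inr ⟨cost, hc, rfl⟩)
    · refine ⟨?_, ?_, ?_, ?_⟩ <;> simp only [if_pos hc, if_neg hlt]
      · exact le_refl _
      · first
      | exact Or.inl rfl
      | exact Or.inl trivial
      · intro c h; omega
      · exact iff_of_true trivial (Or.inr ⟨cost, hc, rfl⟩)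
  · refine ⟨?_, ?_, ?_, ?_⟩ <;> simp only [if_neg hc]
    · exact le_refl _
    · first
      | exact Or.inl rfl
      | exact Or.inl trivial
    · intro c h; exact absurd h.1 hc
    · constructor
      · exact fun h => Or.inl h
      · rintro (h | ⟨c, hcc, _⟩)
        · exact h
        · exact absurd hcc hc

theorem updspec_comp {F G : Bool × Int → Bool × Int} {C D : Int → Prop}
    (hF : UpdSpec F C) (hG : UpdSpec G D) :
    UpdSpec (fun st => G (F st)) (fun c => C c ∨ D c) := by
  intro st
  obtain ⟨f1, f2, f3, f4⟩ := hF st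
  obtain ⟨g1, g2, g3, g4⟩ := hG (F st)
  refine ⟨le_trans g1 f1, ?_, ?_, ?_⟩
  · rcases g2 with g2 | g2
    · rw [g2]; rcases f2 with f2 | f2
      · exact Or.inl f2
      · exact Or.inr (Or.inl f2)
    · exact Or.inr (Or.inr g2)
  · rintro c (hc | hc)
    · exact le_trans g1 (f3 c hc)
    · exact g3 c hc
  · rw [g4, f4]
    constructor
    · rintro ((h | ⟨c, hc⟩) | ⟨c, hc⟩)
      · exact Or.inl h
      · exact Or.inr ⟨c, Or.inl hc⟩
      · exact Or.inr ⟨c, Or.inr hc⟩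
    · rintro (h | ⟨c, hc | hc⟩)
      · exact Or.inl (Or.inl h)
      · exact Or.inl (Or.inr ⟨c, hc⟩)
      · exact Or.inr ⟨c, hc⟩

theorem updspec_foldl {α : Type} {step : Bool × Int → α → Bool × Int}
    {C : α → Int → Prop} : ∀ {l : List α},
    (∀ x ∈ l, UpdSpec (fun st => step st x) (C x)) →
    UpdSpec (fun st => l.foldl step st) (fun c => ∃ x ∈ l, C x c)
  | [], _ => by
    intro st
    refine ⟨le_refl _, Or.inl rfl, ?_, by simp⟩
    rintro c ⟨x, hx, _⟩
    simp at hx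
  | x :: xs, h => by
    have hx := h x (List.mem_cons_self)
    have hxs := updspec_foldl (l := xs) (fun y hy => h y (List.mem_cons_of_mem _ hy))
    apply updspec_congr (C := fun c => C x c ∨ ∃ y ∈ xs, C y c)
    · intro st
      simpa only [List.foldl_cons] using (updspec_comp hx hxs) st
    · intro c
      simp only [List.mem_cons]
      constructor
      · rintro (hc | ⟨y, hy, hc⟩)
        · exact ⟨x, Or.inl rfl, hc⟩
        · exact ⟨y, Or.inr hy, hc⟩
      · rintro ⟨y, (rfl | hy), hc⟩
        · exact Or.inl hc
        · exact Or.inr ⟨y, hy, hc⟩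

-- ---- A-side candidate predicates, following the loop structure ----
def CA2e (trees : List Int) (K : Int) (arr1 : List Int) (a2s a2e : Int) (c : Int) : Prop :=
  arr1.sum + (PySem.List.slice trees (some a2s) (some a2e)).sum = K ∧
  c = (arr1.length : Int) + ((PySem.List.slice trees (some a2s) (some a2e)).length : Int)

def CA1e (trees : List Int) (K : Int) (a1s a1e : Int) (c : Int) : Prop :=
  ((PySem.List.slice trees (some a1s) (some a1e)).sum = K ∧
    c = ((PySem.List.slice trees (some a1s) (some a1e)).length : Int)) ∨
  ∃ a2s ∈ PySem.List.pyRange a1e (trees.length : Int) 1,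
    ∃ a2e ∈ PySem.List.pyRange a2s ((trees.length : Int) + 1) 1,
      CA2e trees K (PySem.List.slice trees (some a1s) (some a1e)) a2s a2e c

def CAall (trees : List Int) (K : Int) (c : Int) : Prop :=
  ∃ s ∈ PySem.List.pyRange 0 (trees.length : Int) 1,
    ∃ a1e ∈ PySem.List.pyRange s ((trees.length : Int) + 1) 1, CA1e trees K s a1e c

theorem updspec_stepA2e (trees : List Int) (K : Int) (arr1 : List Int) (a2s a2e : Int) :
    UpdSpec (fun st => stepA2e trees K arr1 a2s st a2e) (CA2e trees K arr1 a2s a2e) :=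
  updspec_single _ _

theorem updspec_stepA2s (trees : List Int) (K : Int) (arr1 : List Int) (a2s : Int) :
    UpdSpec (fun st => stepA2s trees K arr1 st a2s)
      (fun c => ∃ a2e ∈ PySem.List.pyRange a2s ((trees.length : Int) + 1) 1,
        CA2e trees K arr1 a2s a2e c) :=
  updspec_foldl (fun a2e _ => updspec_stepA2e trees K arr1 a2s a2e)

theorem updspec_stepA1e (trees : List Int) (K : Int) (a1s a1e : Int) :
    UpdSpec (fun st => stepA1e trees K a1s st a1e) (CA1e trees K a1s a1e) :=
  updspec_comp (updspec_single _ _)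
    (updspec_foldl (fun a2s _ =>
      updspec_stepA2s trees K (PySem.List.slice trees (some a1s) (some a1e)) a2s))

theorem updspec_Afold (trees : List Int) (K : Int) :
    UpdSpec (fun st => (PySem.List.pyRange 0 (trees.length : Int) 1).foldl
        (fun st s => (PySem.List.pyRange s ((trees.length : Int) + 1) 1).foldl
          (stepA1e trees K s) st) st)
      (CAall trees K) :=
  updspec_foldl (fun s _ => updspec_foldl (fun a1e _ => updspec_stepA1e trees K s a1e))

-- ---- the outer loop with its early return ----
theorem outer_no_hit (trees : List Int) (K : Int) : ∀ (l : List Int) (st : Bool × Int),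
    (∀ s ∈ l, PySem.List.pyGet? trees s ≠ some K) →
    outerA trees K l st =
      (let st' := l.foldl (fun st s =>
          (PySem.List.pyRange s ((trees.length : Int) + 1) 1).foldl (stepA1e trees K s) st) st;
        if st'.1 = false then -1 else st'.2)
  | [], st, _ => rfl
  | s :: rest, st, h => by
    have hs := h s (List.mem_cons_self)
    simp only [outerA, if_neg hs, List.foldl_cons]
    exact outer_no_hit trees K rest _ (fun x hx => h x (List.mem_cons_of_mem _ hx))

theorem outer_hit (trees : List Int) (K : Int) : ∀ (l : List Int) (st : Bool × Int),
    (∃ s ∈ l, PySem.List.pyGet? trees s = some K) →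
    outerA trees K l st = 1
  | s :: rest, st, h => by
    by_cases hs : PySem.List.pyGet? trees s = some K
    · simp only [outerA, if_pos hs]
    · simp only [outerA, if_neg hs]
      apply outer_hit trees K rest
      rcases h with ⟨x, hx, hxK⟩
      rcases List.mem_cons.mp hx with rfl | hx
      · exact absurd hxK hs
      · exact ⟨x, hx, hxK⟩

-- ---- slice arithmetic ----
theorem slice_sum_eq (trees : List Int) {a b : Int} (h0 : 0 ≤ a) (hab : a ≤ b) :
    (PySem.List.slice trees (some a) (some b)).sum = segS trees a.toNat b.toNat := by
  rw [PySem.List.slice_toNat trees h0 (le_trans h0 hab)]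
  rfl

theorem slice_len_eq (trees : List Int) {a b : Int} (h0 : 0 ≤ a) (hab : a ≤ b)
    (hb : b ≤ (trees.length : Int)) :
    ((PySem.List.slice trees (some a) (some b)).length : Int) = b - a := by
  rw [PySem.List.slice_toNat trees h0 (le_trans h0 hab)]
  simp only [List.length_take, List.length_drop]
  omega

theorem segS_self (trees : List Int) (i : Nat) : segS trees i i = 0 := by
  simp [segS]

theorem segS_single (trees : List Int) {k : Nat} (h : k < trees.length) :
    segS trees k (k + 1) = trees[k] := by
  simp [segS, List.take_succ, h]

theorem segS_take (trees : List Int) {i j : Nat} (h : i ≤ j) :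
    (trees.take j).sum = (trees.take i).sum + segS trees i j := by
  have : j = i + (j - i) := by omega
  rw [this, List.take_add, List.sum_append]
  simp only [segS, Nat.add_sub_cancel_left]

-- ---- cost bounds ----
theorem good_nonneg {trees : List Int} {K c : Int} (h : Good trees K c) : 0 ≤ c := by
  obtain ⟨i, j, p, q, _, _, _, _, _, rfl⟩ := h
  positivity

theorem good_le_n {trees : List Int} {K c : Int} (h : Good trees K c) :
    c ≤ (trees.length : Int) := by
  obtain ⟨i, j, p, q, h1, h2, h3, h4, _, rfl⟩ := h
  omega

theorem good_pos {trees : List Int} {K c : Int} (hK : K ≠ 0) (h : Good trees K c) : 1 ≤ c := by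
  obtain ⟨i, j, p, q, h1, h2, h3, h4, hsum, rfl⟩ := h
  by_contra hc
  have e1 : segS trees i j = 0 := by
    rw [show j = i by omega]; exact segS_self trees i
  have e2 : segS trees p q = 0 := by
    rw [show q = p by omega]; exact segS_self trees p
  rw [e1, e2] at hsum
  omega

-- ---- CAall ↔ Good ----
theorem caall_iff_good {trees : List Int} {K : Int} (hne : trees ≠ [] ∨ K ≠ 0) (c : Int) :
    CAall trees K c ↔ Good trees K c := by
  constructor
  · rintro ⟨s, hs, a1e, ha1e, hc⟩
    rw [PySem.List.mem_pyRange_one] at hs ha1e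
    rcases hc with ⟨hsum, hlen⟩ | ⟨a2s, ha2s, a2e, ha2e, hsum, hlen⟩
    · refine ⟨s.toNat, a1e.toNat, trees.length, trees.length, by omega, by omega,
        le_refl _, le_refl _, ?_, ?_⟩
      · rw [segS_self, add_zero, ← slice_sum_eq trees hs.1 (by omega)]
        exact hsum
      · rw [slice_len_eq trees hs.1 (by omega) (by omega)] at hlen
        omega
    · rw [PySem.List.mem_pyRange_one] at ha2s ha2e
      refine ⟨s.toNat, a1e.toNat, a2s.toNat, a2e.toNat, by omega, by omega, by omega,
        by omega, ?_, ?_⟩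
      · rw [← slice_sum_eq trees hs.1 (by omega), ← slice_sum_eq trees (by omega) (by omega)]
        exact hsum
      · rw [slice_len_eq trees hs.1 (by omega) (by omega),
          slice_len_eq trees (by omega) (by omega) (by omega)] at hlen
        omega
  · rintro ⟨i, j, p, q, hij, hjp, hpq, hq, hsum, rfl⟩
    by_cases hpq' : p < q
    · refine ⟨(i : Int), ?_, (j : Int), ?_, Or.inr ⟨(p : Int), ?_, (q : Int), ?_, ?_, ?_⟩⟩
      · rw [PySem.List.mem_pyRange_one]; omega
      · rw [PySem.List.mem_pyRange_one]; omega
      · rw [PySem.List.mem_pyRange_one]; omega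
      · rw [PySem.List.mem_pyRange_one]; omega
      · rw [slice_sum_eq trees (by positivity) (by exact_mod_cast hij),
          slice_sum_eq trees (by positivity) (by exact_mod_cast hpq)]
        simpa using hsum
      · rw [slice_len_eq trees (by positivity) (by exact_mod_cast hij) (by exact_mod_cast (by omega : j ≤ trees.length)),
          slice_len_eq trees (by positivity) (by exact_mod_cast hpq) (by exact_mod_cast hq)]
        omega
    · have hpq'' : p = q := by omega
      have hzero : segS trees p q = 0 := by rw [hpq'']; exact segS_self trees q
      rw [hzero, add_zero] at hsum
      by_cases hin : i < trees.length
      · refine ⟨(i : Int), ?_, (j : Int), ?_, Or.inl ⟨?_, ?_⟩⟩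
        · rw [PySem.List.mem_pyRange_one]; omega
        · rw [PySem.List.mem_pyRange_one]; omega
        · rw [slice_sum_eq trees (by positivity) (by exact_mod_cast hij)]
          simpa using hsum
        · rw [slice_len_eq trees (by positivity) (by exact_mod_cast hij) (by exact_mod_cast (by omega : j ≤ trees.length))]
          omega
      · -- i = j = p = q = length: the empty pair, so K = 0 and trees ≠ []
        have hi : i = trees.length := by omega
        have hj : j = i := by omega
        have hK : K = 0 := by
          rw [hj] at hsum; rw [← hsum]; exact segS_self trees i
        have hn : trees ≠ [] := by tauto
        have hn' : 0 < trees.length := List.length_pos_iff.mpr hn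
        refine ⟨(0 : Int), ?_, (0 : Int), ?_, Or.inl ⟨?_, ?_⟩⟩
        · rw [PySem.List.mem_pyRange_one]; omega
        · rw [PySem.List.mem_pyRange_one]; omega
        · rw [slice_sum_eq trees (by omega) (by omega)]
          simp [hK, segS_self]
        · rw [slice_len_eq trees (by omega) (by omega) (by omega)]
          omega

-- ---- B side: the prefix-sum list ----
theorem altP_foldl : ∀ (ts : List Int) (l : List Int) (s : Int),
    ts.foldl (fun acc t => (acc.1 ++ [acc.2 + t], acc.2 + t)) (l, s) =
      (l ++ (List.range ts.length).map (fun k => s + (ts.take (k + 1)).sum), s + ts.sum)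
  | [], l, s => by simp
  | t :: ts, l, s => by
    simp only [List.foldl_cons]
    rw [altP_foldl ts (l ++ [s + t]) (s + t)]
    simp only [List.length_cons, List.range_succ_eq_map, List.map_cons, List.map_map,
      List.take_succ_cons, List.sum_cons, List.sum_nil, List.append_assoc,
      List.singleton_append, List.take_zero]
    simp only [Prod.mk.injEq]
    refine ⟨?_, by ring⟩
    congr 2
    · ring
    · apply List.map_congr_left
      intro k _
      simp [Function.comp]
      ring

theorem altP_eq (trees : List Int) :
    altP trees = (List.range (trees.length + 1)).map (fun k => (trees.take k).sum) := by
  unfold altP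
  rw [altP_foldl]
  simp only [List.range_succ_eq_map, List.map_cons, List.map_map, List.take_zero,
    List.sum_nil, List.singleton_append]
  congr 1
  apply List.map_congr_left
  intro k _
  simp [Function.comp]

theorem altGet_eq (trees : List Int) {a : Int} (h0 : 0 ≤ a) (ha : a ≤ (trees.length : Int)) :
    altGet (altP trees) a = (trees.take a.toNat).sum := by
  unfold altGet
  rw [altP_eq]
  obtain ⟨k, rfl⟩ := Int.eq_ofNat_of_zero_le h0
  rw [PySem.List.pyGet?_natCast, List.getElem?_map, List.getElem?_range (by omega)]
  simp

-- segment sums via prefix sums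
theorem prefix_sub (trees : List Int) {a b : Int} (h0 : 0 ≤ a) (hab : a ≤ b)
    (hb : b ≤ (trees.length : Int)) :
    altGet (altP trees) b - altGet (altP trees) a = segS trees a.toNat b.toNat := by
  rw [altGet_eq trees h0 (le_trans hab hb), altGet_eq trees (le_trans h0 hab) hb,
    segS_take trees (show a.toNat ≤ b.toNat by omega)]
  ring

theorem mem_altCands {trees : List Int} {K c : Int} :
    c ∈ altCands trees K ↔ Good trees K c := by
  simp only [altCands, List.mem_flatMap, List.mem_map, List.mem_filter,
    PySem.List.mem_pyRange_one, beq_iff_eq]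
  constructor
  · rintro ⟨i, hi, j, hj, p, hp, q, ⟨hq, hcond⟩, rfl⟩
    refine ⟨i.toNat, j.toNat, p.toNat, q.toNat, by omega, by omega, by omega, by omega, ?_, ?_⟩
    · rw [← prefix_sub trees (by omega) (by omega) (by omega),
        ← prefix_sub trees (by omega) (by omega) (by omega)]
      exact hcond
    · omega
  · rintro ⟨i, j, p, q, hij, hjp, hpq, hq, hsum, rfl⟩
    refine ⟨(i : Int), by omega, (j : Int), by omega, (p : Int), by omega, (q : Int),
      ⟨by omega, ?_⟩, by omega⟩
    rw [prefix_sub trees (by omega) (by omega) (by omega),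
      prefix_sub trees (by omega) (by omega) (by omega)]
    simpa using hsum

theorem alt_empty {trees : List Int} {K : Int} (h : ∀ c, ¬ Good trees K c) :
    bunches_alt trees K = -1 := by
  have : altCands trees K = [] := by
    rw [List.eq_nil_iff_forall_not_mem]
    intro c hc
    exact h c (mem_altCands.mp hc)
  simp [bunches_alt, this]

theorem alt_min {trees : List Int} {K m : Int} (hm : Good trees K m)
    (hmin : ∀ c, Good trees K c → m ≤ c) : bunches_alt trees K = m := by
  have hmem : m ∈ altCands trees K := mem_altCands.mpr hm
  have hne : altCands trees K ≠ [] := List.ne_nil_of_mem hmem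
  obtain ⟨m', hm'⟩ : ∃ m', PySem.List.min? (altCands trees K) (fun x => x) = some m' := by
    cases h : PySem.List.min? (altCands trees K) (fun x => x) with
    | none => exact absurd ((PySem.List.min?_eq_none_iff _ _).mp h) hne
    | some m' => exact ⟨m', rfl⟩
  have h1 : m ≤ m' := hmin m' (mem_altCands.mp (PySem.List.min?_mem hm'))
  have h2 : m' ≤ m := PySem.List.min?_isMin hm' m hmem
  simp only [bunches_alt, if_neg hne, hm', Option.getD_some]
  omega

-- ---- main equivalence outside D_ ----
def Afold (trees : List Int) (K : Int) : Bool × Int :=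
  (PySem.List.pyRange 0 (trees.length : Int) 1).foldl
    (fun st s => (PySem.List.pyRange s ((trees.length : Int) + 1) 1).foldl (stepA1e trees K s) st)
    (false, (trees.length : Int) + 1)

theorem bunches_no_hit (trees : List Int) (K : Int)
    (h : ∀ s ∈ PySem.List.pyRange 0 (trees.length : Int) 1,
      PySem.List.pyGet? trees s ≠ some K) :
    bunches trees K = if (Afold trees K).1 = false then -1 else (Afold trees K).2 :=
  outer_no_hit trees K _ _ h

theorem Afold_spec (trees : List Int) (K : Int) :
    ((Afold trees K).2 = (trees.length : Int) + 1 ∨ CAall trees K (Afold trees K).2) ∧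
    (∀ c, CAall trees K c → (Afold trees K).2 ≤ c) ∧
    ((Afold trees K).1 = true ↔ ∃ c, CAall trees K c) := by
  obtain ⟨u1, u2, u3, u4⟩ := updspec_Afold trees K (false, (trees.length : Int) + 1)
  exact ⟨u2, u3, by simpa using u4⟩

theorem main_eq (trees : List Int) (K : Int) (hD : ¬ D_bunches trees K) :
    bunches trees K = bunches_alt trees K := by
  by_cases hhit : ∃ k : Nat, ∃ _ : k < trees.length, trees[k] = K
  · obtain ⟨k, hk, hkK⟩ := hhit
    have hK0 : K ≠ 0 := by
      intro h
      subst h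
      exact hD ⟨rfl, Or.inr (by rw [← hkK]; exact List.getElem_mem hk)⟩
    have hA : bunches trees K = 1 := by
      unfold bunches
      apply outer_hit
      refine ⟨(k : Int), ?_, ?_⟩
      · rw [PySem.List.mem_pyRange_one]; omega
      · rw [PySem.List.pyGet?_natCast, List.getElem?_eq_getElem hk, hkK]
    have hB : bunches_alt trees K = 1 := by
      apply alt_min
      · refine ⟨k, k + 1, trees.length, trees.length, by omega, by omega,
          le_refl _, le_refl _, ?_, by omega⟩
        rw [segS_single trees hk, segS_self, hkK, add_zero]
      · exact fun c hc => good_pos hK0 hc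
    rw [hA, hB]
  · have hne : trees ≠ [] ∨ K ≠ 0 := by
      by_contra h
      rw [not_or, not_not, not_not] at h
      exact hD ⟨h.2, Or.inl h.1⟩
    have hnohit : ∀ s ∈ PySem.List.pyRange 0 (trees.length : Int) 1,
        PySem.List.pyGet? trees s ≠ some K := by
      intro s hs hcontra
      rw [PySem.List.mem_pyRange_one] at hs
      apply hhit
      obtain ⟨k, rfl⟩ := Int.eq_ofNat_of_zero_le hs.1
      rw [PySem.List.pyGet?_natCast] at hcontra
      have hk : k < trees.length := by
        by_contra hk'
        rw [List.getElem?_eq_none (by omega)] at hcontra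
        simp at hcontra
      rw [List.getElem?_eq_getElem hk, Option.some_inj] at hcontra
      exact ⟨k, hk, hcontra⟩
    obtain ⟨u2, u3, u4⟩ := Afold_spec trees K
    rw [bunches_no_hit trees K hnohit]
    by_cases hex : ∃ c, Good trees K c
    · obtain ⟨c0, hc0⟩ := hex
      have hfound : (Afold trees K).1 = true :=
        u4.mpr ⟨c0, (caall_iff_good hne c0).mpr hc0⟩
      have hle : (Afold trees K).2 ≤ c0 := u3 c0 ((caall_iff_good hne c0).mpr hc0)
      have hgood : Good trees K (Afold trees K).2 := by
        rcases u2 with h | h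
        · exfalso
          have := good_le_n hc0
          omega
        · exact (caall_iff_good hne _).mp h
      rw [alt_min hgood (fun c hc => u3 c ((caall_iff_good hne c).mpr hc))]
      simp [hfound]
    · have hnf : (Afold trees K).1 = false := by
        by_contra h
        rcases u4.mp (by simpa using h) with ⟨c, hc⟩
        exact hex ⟨c, (caall_iff_good hne c).mp hc⟩
      rw [alt_empty (fun c hc => hex ⟨c, hc⟩)]
      simp [hnf]

-- ---- the difference region ----
theorem A_eq_one_of_zero_mem (trees : List Int) (h : (0 : Int) ∈ trees) :
    bunches trees 0 = 1 := by
  obtain ⟨k, hk, hkK⟩ := List.mem_iff_getElem.mp h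
  unfold bunches
  apply outer_hit
  refine ⟨(k : Int), ?_, ?_⟩
  · rw [PySem.List.mem_pyRange_one]; omega
  · rw [PySem.List.pyGet?_natCast, List.getElem?_eq_getElem hk, hkK]

theorem B_eq_zero (trees : List Int) : bunches_alt trees 0 = 0 := by
  apply alt_min
  · exact ⟨0, 0, 0, 0, le_refl _, le_refl _, le_refl _, Nat.zero_le _,
      by simp [segS_self], by omega⟩
  · exact fun c hc => good_nonneg hc

-- ===== VERDICT (by name: the statement is the Claim_ definition above) =====
theorem bunches_spec : Claim_unchanged_bunches := by
  intro trees K _ hD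
  exact main_eq trees K hD

theorem bunches_changed : Claim_changed_bunches := by unfold Claim_changed_bunches; decide

theorem bunches_tight : Claim_exact_bunches := by
  intro trees K _ hD
  obtain ⟨hK, hcase⟩ := hD
  subst hK
  rcases hcase with rfl | hmem
  · decide
  · rw [A_eq_one_of_zero_mem trees hmem, B_eq_zero]
    decide
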